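-- pv_equiv track=rewrite | github.com/kbp-lab/TUSNet | src/functions.py | generate_target_combinations
-- ===== SOURCE A (Python) =====
-- from itertools import combinations
--
-- def generate_target_combinations(target_numbers):
--     valid_combinations = []
--
--     for combo in combinations(target_numbers, 2):
--         # Check if the targets are in the same column and are adjacent
--         if abs(combo[0] - combo[1]) == 8:
--             valid_combinations.append(combo)
--         # Check if the targets are in the same row and are adjacent
--         elif (abs(combo[0] - combo[1]) == 1) and ((max(combo) - 1) // 8 == (min(combo) - 1) // 8):
--             valid_combinations.append(combo)
--
--     return valid_combinations
-- ===== SOURCE B (Python) =====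
-- def generate_target_combinations(target_numbers):
--     # Index positions of each value once, then probe the 4 possible neighbor
--     # values per element instead of scanning all later elements.
--     pos = {}
--     for idx, v in enumerate(target_numbers):
--         pos.setdefault(v, []).append(idx)
--     out = []
--     for i, x in enumerate(target_numbers):
--         cands = [x - 8, x + 8]
--         if (x - 1) // 8 == (x - 2) // 8:
--             cands.append(x - 1)
--         if x // 8 == (x - 1) // 8:
--             cands.append(x + 1)
--         js = sorted(j for v in cands for j in pos.get(v, ()) if j > i)
--         out.extend((x, target_numbers[j]) for j in js)
--     return out
-- ===== Notes on version B (the rewrite author's own statement) =====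
-- stated objective: faster
-- what changed: Replaces the O(n^2) scan over all pairs with a value->positions index built once; each element probes only its 4 possible neighbor values (x±1 with the row check, x±8) in the index and emits partners in input order.
import Mathlib
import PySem

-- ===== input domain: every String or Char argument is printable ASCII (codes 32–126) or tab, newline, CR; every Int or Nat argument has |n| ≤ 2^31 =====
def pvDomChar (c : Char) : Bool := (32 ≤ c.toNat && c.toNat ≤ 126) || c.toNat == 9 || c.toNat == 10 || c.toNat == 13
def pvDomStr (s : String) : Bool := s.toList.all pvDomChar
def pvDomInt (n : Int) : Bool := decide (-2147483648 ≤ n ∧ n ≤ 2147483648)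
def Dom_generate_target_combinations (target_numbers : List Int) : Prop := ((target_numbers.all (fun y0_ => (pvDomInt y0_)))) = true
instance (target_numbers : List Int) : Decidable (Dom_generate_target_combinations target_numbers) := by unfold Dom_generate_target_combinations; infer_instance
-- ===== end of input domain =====

-- B replaces A's scan over all pairs with a value->positions index probed at the
-- four possible neighbor values of each element (objective: faster).


-- ===== PORT A =====
-- combinations(target_numbers, 2) in itertools order: each element paired with all later ones
def pvCombos2 : List Int → List (Int × Int)
  | [] => []
  | x :: rest => rest.map (fun y => (x, y)) ++ pvCombos2 rest

def generate_target_combinations (target_numbers : List Int) : List (Int × Int) :=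
  (pvCombos2 target_numbers).foldl
    (fun acc c =>
      if (c.1 - c.2).natAbs == 8 then acc ++ [c]
      else if (c.1 - c.2).natAbs == 1 &&
          (PySem.Int.floordiv (max c.1 c.2 - 1) 8 == PySem.Int.floordiv (min c.1 c.2 - 1) 8) then
        acc ++ [c]
      else acc) []

-- ===== PORT B =====
-- candidate neighbor values of x (row check folded into the candidates)
def pvCands (x : Int) : List Int :=
  let cands := [x - 8, x + 8]
  let cands := if PySem.Int.floordiv (x - 1) 8 == PySem.Int.floordiv (x - 2) 8 then cands ++ [x - 1] else cands
  if PySem.Int.floordiv x 8 == PySem.Int.floordiv (x - 1) 8 then cands ++ [x + 1] else cands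

-- pos[v] = positions of v in input order; setdefault(v, []).append(idx) = modify v [] (· ++ [idx])
def pvPos (target_numbers : List Int) : PySem.Dict Int (List Int) :=
  (PySem.List.enumerate target_numbers).foldl
    (fun d p => d.modify p.2 [] (fun l => l ++ [p.1])) PySem.Dict.empty

def generate_target_combinations_alt (target_numbers : List Int) : List (Int × Int) :=
  let pos := pvPos target_numbers
  (PySem.List.enumerate target_numbers).foldl
    (fun out p =>
      let js := PySem.List.sorted
        ((pvCands p.2).flatMap (fun v => (pos.getD v []).filter (fun j => decide (p.1 < j))))
        (fun j => j) false
      out ++ js.map (fun j => (p.2, PySem.List.pyGetD target_numbers j 0))) []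

-- ===== PRECONDITION & SPEC =====
def Spec_generate_target_combinations (target_numbers : List Int) (out : List (Int × Int)) : Prop := out = generate_target_combinations_alt target_numbers
instance (target_numbers : List Int) (out : List (Int × Int)) : Decidable (Spec_generate_target_combinations target_numbers out) := by unfold Spec_generate_target_combinations; infer_instance

-- ===== CLAIM (what is proved, stated in full; the proofs are below) =====
def Claim_equal_generate_target_combinations : Prop := ∀ (target_numbers : List Int), Dom_generate_target_combinations target_numbers → Spec_generate_target_combinations target_numbers (generate_target_combinations target_numbers)

-- ===== LEMMAS AND PROOFS =====

-- A's pair condition as one Boolean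
def pvCondA (c : Int × Int) : Bool :=
  (c.1 - c.2).natAbs == 8 ||
  ((c.1 - c.2).natAbs == 1 &&
    (PySem.Int.floordiv (max c.1 c.2 - 1) 8 == PySem.Int.floordiv (min c.1 c.2 - 1) 8))

theorem pvA_eq_filter (xs : List Int) :
    generate_target_combinations xs = (pvCombos2 xs).filter pvCondA := by
  unfold generate_target_combinations
  have h : (fun (acc : List (Int × Int)) (c : Int × Int) =>
      if (c.1 - c.2).natAbs == 8 then acc ++ [c]
      else if (c.1 - c.2).natAbs == 1 &&
          (PySem.Int.floordiv (max c.1 c.2 - 1) 8 == PySem.Int.floordiv (min c.1 c.2 - 1) 8) then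
        acc ++ [c]
      else acc)
      = fun acc c => if pvCondA c = true then acc ++ [id c] else acc := by
    funext acc c
    simp only [pvCondA, id, Bool.or_eq_true, Bool.and_eq_true]
    split_ifs <;> simp_all
  rw [h, PySem.List.foldl_append_if]
  simp

theorem pvCondA_char (x y : Int) :
    pvCondA (x, y) = true ↔
      (y = x - 8 ∨ y = x + 8 ∨
       (y = x - 1 ∧ PySem.Int.floordiv (x-1) 8 = PySem.Int.floordiv (x-2) 8) ∨
       (y = x + 1 ∧ PySem.Int.floordiv x 8 = PySem.Int.floordiv (x-1) 8)) := by
  unfold pvCondA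
  simp only [Bool.or_eq_true, Bool.and_eq_true, beq_iff_eq]
  constructor
  · rintro (h | ⟨h1, h2⟩)
    · omega
    · have : y = x + 1 ∨ y = x - 1 := by omega
      rcases this with h | h
      · subst h
        have hm : max x (x+1) = x + 1 := by omega
        have hn : min x (x+1) = x := by omega
        rw [hm, hn] at h2
        simp only [add_sub_cancel_right] at h2
        exact Or.inr (Or.inr (Or.inr ⟨rfl, h2⟩))
      · subst h
        have hm : max x (x-1) = x := by omega
        have hn : min x (x-1) = x - 1 := by omega
        rw [hm, hn] at h2
        have e : x - 1 - 1 = x - 2 := by ring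
        rw [e] at h2
        exact Or.inr (Or.inr (Or.inl ⟨rfl, h2⟩))
  · rintro (h | h | ⟨h, h2⟩ | ⟨h, h2⟩)
    · left; omega
    · left; omega
    · subst h; right
      constructor
      · omega
      · have hm : max x (x-1) = x := by omega
        have hn : min x (x-1) = x - 1 := by omega
        rw [hm, hn]
        have e : x - 1 - 1 = x - 2 := by ring
        rw [e]; exact h2
    · subst h; right
      constructor
      · omega
      · have hm : max x (x+1) = x + 1 := by omega
        have hn : min x (x+1) = x := by omega
        rw [hm, hn]
        simp only [add_sub_cancel_right]; exact h2

theorem pvCands_char (x y : Int) :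
    (pvCands x).contains y = true ↔
      (y = x - 8 ∨ y = x + 8 ∨
       (y = x - 1 ∧ PySem.Int.floordiv (x-1) 8 = PySem.Int.floordiv (x-2) 8) ∨
       (y = x + 1 ∧ PySem.Int.floordiv x 8 = PySem.Int.floordiv (x-1) 8)) := by
  unfold pvCands
  split_ifs with h1 h2 h3 <;> simp_all [List.contains_eq_mem]

theorem pvCands_iff (x y : Int) : (pvCands x).contains y = pvCondA (x, y) := by
  rw [Bool.eq_iff_iff, pvCands_char, pvCondA_char]

theorem pvCands_nodup (x : Int) : (pvCands x).Nodup := by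
  unfold pvCands; split_ifs <;> simp <;> omega

theorem pvPos_getD (xs : List Int) (v : Int) :
    (pvPos xs).getD v [] =
      ((PySem.List.enumerate xs).filter (fun p => p.2 == v)).map (·.1) := by
  unfold pvPos
  rw [show ((PySem.List.enumerate xs).foldl
      (fun d p => d.modify p.2 [] (fun l => l ++ [p.1])) PySem.Dict.empty)
    = (((PySem.List.enumerate xs).map (fun p => (p.2, p.1))).foldl
      (fun d p => d.modify p.1 [] (fun l => l ++ [p.2])) PySem.Dict.empty) from by
    rw [List.foldl_map]]
  rw [PySem.Dict.getD_foldl_modify_append]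
  simp [List.filter_map, Function.comp_def]

theorem pvMemPosFilter (xs : List Int) (v i j : Int) :
    (j ∈ ((pvPos xs).getD v []).filter (fun j => decide (i < j))) ↔
      ∃ k : Nat, ∃ _ : k < xs.length, j = (k : Int) ∧ xs[k] = v ∧ i < j := by
  rw [pvPos_getD]
  simp only [List.mem_filter, List.mem_map, PySem.List.mem_enumerate_iff]
  constructor
  · rintro ⟨⟨p, ⟨⟨k, hk, rfl⟩, hv⟩, rfl⟩, hi⟩
    simp only [beq_iff_eq] at hv
    exact ⟨k, hk, by simp, by simpa using hv, by simpa using hi⟩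
  · rintro ⟨k, hk, rfl, hv, hi⟩
    exact ⟨⟨(⟨(k : Int), xs[k]⟩ : Int × Int), ⟨⟨k, hk, by simp⟩, by simpa using hv⟩, rfl⟩, by simpa using hi⟩

-- the sorted list of matching later positions, characterized
theorem pvJs (xs : List Int) (i x : Int) :
    PySem.List.sorted
      ((pvCands x).flatMap (fun v => ((pvPos xs).getD v []).filter (fun j => decide (i < j))))
      (fun j => j) false
    = ((PySem.List.enumerate xs).filter
        (fun q => decide (i < q.1) && (pvCands x).contains q.2)).map (·.1) := by
  have hpairR : (((PySem.List.enumerate xs).filter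
      (fun q => decide (i < q.1) && (pvCands x).contains q.2)).map (·.1)).Pairwise (· < ·) := by
    rw [List.pairwise_map]
    exact (PySem.List.pairwise_lt_enumerate xs 0).filter _
  apply PySem.List.sorted_eq_of_perm_of_pairwise_lt
  · have hnodL : ((pvCands x).flatMap
        (fun v => ((pvPos xs).getD v []).filter (fun j => decide (i < j)))).Nodup := by
      rw [List.nodup_flatMap]
      constructor
      · intro v _
        rw [pvPos_getD]
        have h2 : (((PySem.List.enumerate xs).filter (fun p => p.2 == v)).map (·.1)).Pairwise
            ((· < ·) : Int → Int → Prop) :=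
          List.pairwise_map.mpr ((PySem.List.pairwise_lt_enumerate xs 0).filter _)
        exact (h2.imp ne_of_lt).filter _
      · refine (pvCands_nodup x).imp ?_
        intro a b hab j hja hjb
        rw [pvMemPosFilter] at hja hjb
        obtain ⟨k, hk, rfl, hxa, -⟩ := hja
        obtain ⟨k', hk', hkk', hxb, -⟩ := hjb
        have : k = k' := by exact_mod_cast hkk'
        subst this
        exact hab (hxa ▸ hxb ▸ rfl)
    refine ((List.perm_ext_iff_of_nodup hnodL (hpairR.imp ne_of_lt)).mpr ?_).symm
    intro j
    rw [List.mem_flatMap]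
    constructor
    · rintro ⟨v, hv, hmem⟩
      rw [pvMemPosFilter] at hmem
      obtain ⟨k, hk, rfl, hxk, hi⟩ := hmem
      refine List.mem_map.mpr ⟨((k : Int), xs[k]), List.mem_filter.mpr ⟨?_, ?_⟩, rfl⟩
      · exact (PySem.List.mem_enumerate_iff _ _ _).mpr ⟨k, hk, by simp⟩
      · simp only [Bool.and_eq_true, decide_eq_true_eq, List.contains_eq_mem]
        exact ⟨hi, by simpa [hxk] using hv⟩
    · intro hj
      obtain ⟨q, hq, rfl⟩ := List.mem_map.mp hj
      obtain ⟨hqm, hcond⟩ := List.mem_filter.mp hq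
      obtain ⟨k, hk, rfl⟩ := (PySem.List.mem_enumerate_iff _ _ _).mp hqm
      simp only [Bool.and_eq_true, decide_eq_true_eq, List.contains_eq_mem] at hcond
      refine ⟨xs[k], by simpa using hcond.2, ?_⟩
      rw [pvMemPosFilter]
      exact ⟨k, hk, by simp, rfl, by simpa using hcond.1⟩
  · exact hpairR

theorem pvEnumerateSnd {β : Type} (rest : List Int) (s : Int) (P : Int → Bool) (f : Int → β) :
    ((PySem.List.enumerate rest s).filter (fun q => P q.2)).map (fun q => f q.2)
      = (rest.filter P).map f := by
  induction rest generalizing s with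
  | nil => rfl
  | cons y t ih =>
    rw [PySem.List.enumerate_cons]
    by_cases h : P y
    · rw [List.filter_cons_of_pos (by simpa using h), List.filter_cons_of_pos h]
      simp only [List.map_cons]
      rw [ih]
    · rw [List.filter_cons_of_neg (by simpa using h), List.filter_cons_of_neg h]
      exact ih (s + 1)

theorem pvCombos2_filter (xs : List Int) (s : Int) :
    (pvCombos2 xs).filter pvCondA =
      (PySem.List.enumerate xs s).flatMap (fun p =>
        ((PySem.List.enumerate xs s).filter
          (fun q => decide (p.1 < q.1) && pvCondA (p.2, q.2))).map (fun q => (p.2, q.2))) := by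
  induction xs generalizing s with
  | nil => rfl
  | cons x rest ih =>
    rw [PySem.List.enumerate_cons]
    rw [List.flatMap_cons]
    have hhead : ((((s, x) :: PySem.List.enumerate rest (s + 1)).filter
          (fun q => decide ((s, x).1 < q.1) && pvCondA ((s, x).2, q.2))).map (fun q => ((s, x).2, q.2)))
        = (rest.map (fun y => (x, y))).filter pvCondA := by
      rw [List.filter_cons_of_neg (by simp)]
      have hcg : (PySem.List.enumerate rest (s + 1)).filter
            (fun q => decide ((s, x).1 < q.1) && pvCondA ((s, x).2, q.2))
          = (PySem.List.enumerate rest (s + 1)).filter (fun q => pvCondA (x, q.2)) := by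
        apply List.filter_congr
        intro q hq
        obtain ⟨k, hk, rfl⟩ := (PySem.List.mem_enumerate_iff _ _ _).mp hq
        have : (s : Int) < s + 1 + (k : Int) := by omega
        simp [this]
      rw [hcg, pvEnumerateSnd rest (s+1) (fun y => pvCondA (x, y)) (fun y => (x, y)),
        List.filter_map]
      rfl
    have htail : (PySem.List.enumerate rest (s + 1)).flatMap (fun p =>
          ((((s, x) :: PySem.List.enumerate rest (s + 1)).filter
            (fun q => decide (p.1 < q.1) && pvCondA (p.2, q.2))).map (fun q => (p.2, q.2))))
        = (pvCombos2 rest).filter pvCondA := by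
      rw [ih (s + 1)]
      apply List.flatMap_congr
      intro p hp
      obtain ⟨k, hk, rfl⟩ := (PySem.List.mem_enumerate_iff _ _ _).mp hp
      rw [List.filter_cons_of_neg (by simp; omega)]
    rw [hhead, htail]
    simp [pvCombos2, List.filter_append]

theorem generate_target_combinations_spec' (xs : List Int) :
    generate_target_combinations xs = generate_target_combinations_alt xs := by
  rw [pvA_eq_filter, pvCombos2_filter xs 0]
  show _ = (PySem.List.enumerate xs).foldl
    (fun out p => out ++ (PySem.List.sorted
        ((pvCands p.2).flatMap (fun v => ((pvPos xs).getD v []).filter (fun j => decide (p.1 < j))))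
        (fun j => j) false).map (fun j => (p.2, PySem.List.pyGetD xs j 0))) []
  rw [PySem.List.foldl_append_eq_flatMap]
  rw [List.nil_append]
  apply List.flatMap_congr
  intro p hp
  obtain ⟨k, hk, rfl⟩ := (PySem.List.mem_enumerate_iff _ _ _).mp hp
  rw [pvJs]
  rw [List.map_map]
  symm
  have hfc : ((PySem.List.enumerate xs).filter
        (fun q => decide ((0 + (k:Int), xs[k]).1 < q.1) && (pvCands (0 + (k:Int), xs[k]).2).contains q.2))
      = ((PySem.List.enumerate xs).filter
        (fun q => decide ((0 + (k:Int), xs[k]).1 < q.1) && pvCondA ((0 + (k:Int), xs[k]).2, q.2))) := by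
    apply List.filter_congr
    intro q _
    rw [pvCands_iff]
  rw [hfc]
  apply List.map_congr_left
  intro q hq
  obtain ⟨hqm, -⟩ := List.mem_filter.mp hq
  obtain ⟨m, hm, rfl⟩ := (PySem.List.mem_enumerate_iff _ _ _).mp hqm
  simp only [Function.comp]
  have : ((0:Int) + (m:Int)) = ((m:Nat) : Int) := by omega
  rw [this, PySem.List.pyGetD_natCast, List.getD_eq_getElem _ _ hm]

-- ===== VERDICT (by name: the statement is the Claim_ definition above) =====
theorem generate_target_combinations_spec : Claim_equal_generate_target_combinations := by
  intro xs _
  unfold Spec_generate_target_combinations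
  exact generate_target_combinations_spec' xs
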